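-- pv_equiv track=rewrite | github.com/davidfmiller/lbactions | Add to Notes.lbaction/Contents/Scripts/default.py | esc
-- ===== SOURCE A (Python) =====
-- def esc(arg):
--   """
--   Escapes a string's characters
--
--   @param arg (string)
--   @return string
--   """
--
--
--   buf = ''
--   for i in arg:
--     if (i == '\\'):
--       buf += '\\\\'
--     elif (i == '\n'):
--       buf += '<br/>'
--     elif (i == '"'):
--       buf += '\\"'
--     elif (i == ' '):
--       buf += '&nbsp;'
--     elif (i == '>'):
--       buf += '&gt;'
--     elif (i == '<'):
--       buf += '&lt;'
--     else:
--       buf += i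
--
--   return buf
-- ===== SOURCE B (Python) =====
-- def esc(arg):
--   """Escapes a string's characters by staged whole-string replace passes.
--
--   Order matters and makes this correct: backslashes are escaped first, so the
--   backslash that '\"' introduces is never re-escaped; '\n' -> '<br/>' runs last,
--   after '<'/'>' are handled, so its markup survives; no other replacement
--   produces a character that a later pass rewrites.
--   """
--   for c, repl in (('\\', '\\\\'),
--                   ('"', '\\"'),
--                   ('>', '&gt;'),
--                   ('<', '&lt;'),
--                   (' ', '&nbsp;'),
--                   ('\n', '<br/>')):
--     arg = arg.replace(c, repl)
--   return arg
-- ===== Notes on version B (the rewrite author's own statement) =====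
-- stated objective: faster
-- what changed: Replaced the char-by-char scan with a branch chain and string concatenation by six staged whole-string str.replace passes (one per special character), ordered so no pass rewrites a previous pass's output (backslash first, newline-to-<br/> last).
import Mathlib
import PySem

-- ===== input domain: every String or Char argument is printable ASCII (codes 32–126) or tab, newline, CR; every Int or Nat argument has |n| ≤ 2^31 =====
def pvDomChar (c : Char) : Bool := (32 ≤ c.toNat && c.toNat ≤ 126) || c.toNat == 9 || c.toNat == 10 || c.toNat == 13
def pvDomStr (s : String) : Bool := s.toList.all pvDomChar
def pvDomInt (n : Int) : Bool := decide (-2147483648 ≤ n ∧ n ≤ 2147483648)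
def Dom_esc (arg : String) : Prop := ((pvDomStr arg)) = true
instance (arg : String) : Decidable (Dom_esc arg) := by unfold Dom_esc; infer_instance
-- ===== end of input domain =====

-- B replaces A's single char-by-char scan-and-branch with six staged whole-string replace passes (alternative decomposition; order of passes makes it exact).


-- ===== PORT A =====
-- literal transliteration: loop over chars, appending onto buf, branch chain in source order
def esc (arg : String) : String :=
  arg.toList.foldl (fun buf i =>
    if i == '\\' then buf ++ "\\\\"
    else if i == '\n' then buf ++ "<br/>"
    else if i == '"' then buf ++ "\\\""
    else if i == ' ' then buf ++ "&nbsp;"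
    else if i == '>' then buf ++ "&gt;"
    else if i == '<' then buf ++ "&lt;"
    else buf ++ String.ofList [i]) ""

-- ===== PORT B =====
-- the staged replace passes, in Source B's order (backslash first, newline last)
def escStages : List (Char × String) :=
  [('\\', "\\\\"), ('"', "\\\""), ('>', "&gt;"), ('<', "&lt;"), (' ', "&nbsp;"), ('\n', "<br/>")]

-- port of Source B's loop: arg = arg.replace(c, repl) for each stage
def esc_alt (arg : String) : String :=
  escStages.foldl (fun s p => PySem.Str.replace s (String.ofList [p.1]) p.2) arg

-- ===== PRECONDITION & SPEC =====
def Spec_esc (arg : String) (out : String) : Prop := out = esc_alt arg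
instance (arg : String) (out : String) : Decidable (Spec_esc arg out) := by unfold Spec_esc; infer_instance

-- ===== CLAIM (what is proved, stated in full; the proofs are below) =====
def Claim_equal_esc : Prop := ∀ (arg : String), Dom_esc arg → Spec_esc arg (esc arg)

-- ===== LEMMAS AND PROOFS =====

-- replacement of a single char, as a per-char map
def rep1 (c : Char) (new : List Char) (x : Char) : List Char :=
  if x = c then new else [x]

theorem go_single (c : Char) (new : List Char) :
    ∀ (l : List Char) (fuel : Nat) (acc : List Char), l.length ≤ fuel →
      PySem.Chars.replace.go [c] new fuel l acc =
        acc.reverse ++ l.flatMap (rep1 c new) := by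
  intro l
  induction l with
  | nil =>
    intro fuel acc _
    cases fuel <;> simp [PySem.Chars.replace.go]
  | cons x t ih =>
    intro fuel acc h
    cases fuel with
    | zero => simp at h
    | succ fuel =>
      by_cases hx : x = c
      · subst hx
        have hpre : List.isPrefixOf [x] (x :: t) = true := by
          simp [List.isPrefixOf]
        simp only [PySem.Chars.replace.go, hpre, if_true, List.length_cons,
          List.length_nil, List.drop_succ_cons, List.drop_zero]
        rw [ih fuel (new.reverse ++ acc) (by simpa using h)]
        simp [rep1]
      · have hpre : List.isPrefixOf [c] (x :: t) = false := by
          simp [List.isPrefixOf]; exact fun hh => (hx hh.symm).elim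
        simp only [PySem.Chars.replace.go, hpre]
        rw [ih fuel (x :: acc) (by simpa using Nat.le_of_succ_le_succ h)]
        simp [rep1, hx]

theorem replace_single (s : List Char) (c : Char) (new : List Char) :
    PySem.Chars.replace s [c] new = s.flatMap (rep1 c new) := by
  unfold PySem.Chars.replace
  simp only [List.isEmpty_cons, Bool.false_eq_true, if_false]
  simpa using go_single c new s s.length [] le_rfl

-- A's per-char output
def escCharL (i : Char) : List Char :=
  if i = '\\' then "\\\\".toList
  else if i = '\n' then "<br/>".toList
  else if i = '"' then "\\\"".toList
  else if i = ' ' then "&nbsp;".toList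
  else if i = '>' then "&gt;".toList
  else if i = '<' then "&lt;".toList
  else [i]

-- the composite of the six staged per-char maps equals A's per-char output
theorem stages_composite (x : Char) :
    ((((((rep1 '\\' "\\\\".toList x).flatMap (rep1 '"' "\\\"".toList)).flatMap
        (rep1 '>' "&gt;".toList)).flatMap (rep1 '<' "&lt;".toList)).flatMap
        (rep1 ' ' "&nbsp;".toList)).flatMap (rep1 '\n' "<br/>".toList)) = escCharL x := by
  by_cases h1 : x = '\\'
  · subst h1; decide
  · by_cases h2 : x = '\n'
    · subst h2; decide
    · by_cases h3 : x = '"'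
      · subst h3; decide
      · by_cases h4 : x = ' '
        · subst h4; decide
        · by_cases h5 : x = '>'
          · subst h5; decide
          · by_cases h6 : x = '<'
            · subst h6; decide
            · simp [rep1, escCharL, h1, h2, h3, h4, h5, h6]

theorem esc_alt_toList (arg : String) :
    (esc_alt arg).toList = arg.toList.flatMap escCharL := by
  unfold esc_alt escStages
  simp only [List.foldl_cons, List.foldl_nil]
  simp only [PySem.Str.toList_replace]
  simp only [String.toList_ofList]
  rw [replace_single, replace_single, replace_single, replace_single, replace_single,
      replace_single]
  simp only [List.flatMap_assoc]
  refine List.flatMap_congr (fun x _ => ?_)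
  simp only [← List.flatMap_assoc]
  exact stages_composite x

-- A's branch chain per step, as an append of escCharL
theorem esc_step_toList (buf : String) (i : Char) :
    (if i == '\\' then buf ++ "\\\\"
     else if i == '\n' then buf ++ "<br/>"
     else if i == '"' then buf ++ "\\\""
     else if i == ' ' then buf ++ "&nbsp;"
     else if i == '>' then buf ++ "&gt;"
     else if i == '<' then buf ++ "&lt;"
     else buf ++ String.ofList [i]).toList = buf.toList ++ escCharL i := by
  by_cases h1 : i = '\\'
  · subst h1; simp [escCharL]
  · by_cases h2 : i = '\n'
    · subst h2; simp [escCharL, h1]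
    · by_cases h3 : i = '"'
      · subst h3; simp [escCharL, h1, h2]
      · by_cases h4 : i = ' '
        · subst h4; simp [escCharL, h1, h2, h3]
        · by_cases h5 : i = '>'
          · subst h5; simp [escCharL, h1, h2, h3, h4]
          · by_cases h6 : i = '<'
            · subst h6; simp [escCharL, h1, h2, h3, h4, h5]
            · simp [escCharL, h1, h2, h3, h4, h5, h6]

theorem esc_fold_toList (l : List Char) (buf : String) :
    (l.foldl (fun buf i =>
      if i == '\\' then buf ++ "\\\\"
      else if i == '\n' then buf ++ "<br/>"
      else if i == '"' then buf ++ "\\\""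
      else if i == ' ' then buf ++ "&nbsp;"
      else if i == '>' then buf ++ "&gt;"
      else if i == '<' then buf ++ "&lt;"
      else buf ++ String.ofList [i]) buf).toList = buf.toList ++ l.flatMap escCharL := by
  induction l generalizing buf with
  | nil => simp
  | cons c t ih =>
    simp only [List.foldl_cons, List.flatMap_cons]
    rw [ih]
    rw [esc_step_toList]
    simp [List.append_assoc]

-- ===== VERDICT (by name: the statement is the Claim_ definition above) =====
theorem esc_spec : Claim_equal_esc := by
  intro arg _
  unfold Spec_esc
  rw [← String.toList_inj]
  rw [esc_alt_toList]
  unfold esc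
  rw [esc_fold_toList]
  rfl
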